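/- GENERATED by farm/mkstatement.py from design/units.split.tsv — do not edit.
   THE SPLIT of the proof unit `vorbis_decode_packet_rest.4` into `vorbis_decode_packet_rest.4a`, `vorbis_decode_packet_rest.4b`, `vorbis_decode_packet_rest.4c`, `vorbis_decode_packet_rest.4d`, `vorbis_decode_packet_rest.4e`: the children's statements give the parent's
   UNCHANGED statement (so nothing above the parent — callers, compositions — is touched by the split). -/
import Vorbis.Spec.PacketRest4
import Vorbis.Spec.Units.vorbis_decode_packet_rest_4
import Vorbis.Spec.Units.vorbis_decode_packet_rest_4a
import Vorbis.Spec.Units.vorbis_decode_packet_rest_4b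
import Vorbis.Spec.Units.vorbis_decode_packet_rest_4c
import Vorbis.Spec.Units.vorbis_decode_packet_rest_4d
import Vorbis.Spec.Units.vorbis_decode_packet_rest_4e
namespace Vorbis.Spec.Splits
open X86 X86.User Asan

/-- The children of the split unit `vorbis_decode_packet_rest.4` prove it, by `Vorbis.Spec.vorbis_decode_packet_rest.Seg4.of_parts`. -/
theorem vorbis_decode_packet_rest_4
    (h_vorbis_decode_packet_rest_4a : Vorbis.Spec.vorbis_decode_packet_rest_4a.Statement)
    (h_vorbis_decode_packet_rest_4b : Vorbis.Spec.vorbis_decode_packet_rest_4b.Statement)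
    (h_vorbis_decode_packet_rest_4c : Vorbis.Spec.vorbis_decode_packet_rest_4c.Statement)
    (h_vorbis_decode_packet_rest_4d : Vorbis.Spec.vorbis_decode_packet_rest_4d.Statement)
    (h_vorbis_decode_packet_rest_4e : Vorbis.Spec.vorbis_decode_packet_rest_4e.Statement) :
    Vorbis.Spec.vorbis_decode_packet_rest_4.Statement := by
  intro Lay _hLay μ _hμ u₀ _hcode _h_prep_huffman _h_codebook_decode_scalar_raw _h_asan_load1_noabort _h_asan_load8_noabort _h_asan_load4_noabort _h_asan_store2_noabort _h_asan_load2_noabort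
  apply Vorbis.Spec.vorbis_decode_packet_rest.Seg4.of_parts
  · exact h_vorbis_decode_packet_rest_4a Lay _hLay μ _hμ u₀ _hcode _h_asan_store2_noabort _h_asan_load2_noabort
  · exact h_vorbis_decode_packet_rest_4b Lay _hLay μ _hμ u₀ _hcode _h_prep_huffman _h_asan_load8_noabort _h_asan_load4_noabort
  · exact h_vorbis_decode_packet_rest_4c Lay _hLay μ _hμ u₀ _hcode _h_codebook_decode_scalar_raw _h_asan_load1_noabort _h_asan_load8_noabort _h_asan_load4_noabort _h_asan_load2_noabort
  · exact h_vorbis_decode_packet_rest_4d Lay _hLay μ _hμ u₀ _hcode _h_asan_load1_noabort _h_asan_load8_noabort _h_asan_load4_noabort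
  · exact h_vorbis_decode_packet_rest_4e Lay _hLay μ _hμ u₀ _hcode _h_asan_store2_noabort

end Vorbis.Spec.Splits
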